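-- pv_equiv track=rewrite | github.com/JakeCob/Ilokano-to-Tagalog-Machince-Translation | module/tl_il/doc_trans_smt_tl/__init__.py | inFPhrases
-- ===== SOURCE A (Python) =====
-- def inFPhrases(word, word2, word3, word4, word5, tl_phrases):
--     inFPhrases = False
--     tl_phrase = []
--     w_used = 0
--     for phrase in tl_phrases:
--         length = len(phrase)
--         if length == 1:
--             if word == phrase[0]:
--                 inFPhrases = True
--                 tl_phrase = phrase
--                 w_used = 1
--         if length == 2:
--             if word == phrase[0] and word2 == phrase[1]:
--                 inFPhrases = True
--                 tl_phrase = phrase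
--                 w_used = 2
--         if length == 3:
--             if word == phrase[0] and word2 == phrase[1] and word3 == phrase[2]:
--                 inFPhrases = True
--                 tl_phrase = phrase
--                 w_used = 3
--         if length == 4:
--             if word == phrase[0] and word2 == phrase[1] and word3 == phrase[2] and word4 == phrase[3]:
--                 inFPhrases = True
--                 tl_phrase = phrase
--                 w_used = 4
--         if length == 5:
--             if word == phrase[0] and word2 == phrase[1] and word3 == phrase[2] and word4 == phrase[3] and word5 == phrase[4]:
--                 inFPhrases = True
--                 tl_phrase = phrase
--                 w_used = 5
--
--     return inFPhrases, tl_phrase, w_used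
-- ===== SOURCE B (Python) =====
-- def inFPhrases(word, word2, word3, word4, word5, tl_phrases):
--     # A phrase matches iff it equals one of the five candidate prefixes
--     # words[:1]..words[:5]; so index every phrase by its last position once,
--     # then look up only those five candidates and take the rightmost hit.
--     words = [word, word2, word3, word4, word5]
--     last = {}
--     for i, phrase in enumerate(tl_phrases):
--         last[tuple(phrase)] = i
--     best_i, best_k = -1, 0
--     for k in range(1, 6):
--         i = last.get(tuple(words[:k]), -1)
--         if i > best_i:
--             best_i, best_k = i, k
--     if best_i < 0:
--         return False, [], 0
--     return True, tl_phrases[best_i], best_k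
-- ===== Notes on version B (the rewrite author's own statement) =====
-- stated objective: alternative
-- what changed: Instead of testing every phrase against five per-length branches with last-match-wins mutable state, B observes that a phrase can match only if it equals one of the five candidate prefixes words[:1..5], builds a hash index phrase->last position in one pass, and then looks up just those five candidates and returns the rightmost hit.
import Mathlib
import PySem

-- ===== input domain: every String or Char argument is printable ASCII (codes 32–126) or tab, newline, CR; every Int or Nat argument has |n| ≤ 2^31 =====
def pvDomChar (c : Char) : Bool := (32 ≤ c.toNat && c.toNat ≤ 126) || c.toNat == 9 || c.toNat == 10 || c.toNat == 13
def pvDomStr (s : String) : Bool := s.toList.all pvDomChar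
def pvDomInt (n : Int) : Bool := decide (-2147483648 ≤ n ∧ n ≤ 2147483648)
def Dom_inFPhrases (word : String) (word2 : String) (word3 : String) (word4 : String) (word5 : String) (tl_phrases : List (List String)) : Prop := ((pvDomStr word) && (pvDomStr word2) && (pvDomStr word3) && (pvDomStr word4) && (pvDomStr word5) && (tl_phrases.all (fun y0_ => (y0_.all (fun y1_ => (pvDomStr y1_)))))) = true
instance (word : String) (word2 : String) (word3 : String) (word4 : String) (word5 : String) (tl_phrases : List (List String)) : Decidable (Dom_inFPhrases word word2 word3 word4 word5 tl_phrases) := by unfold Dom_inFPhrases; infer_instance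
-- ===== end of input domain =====

-- B replaces A's per-phrase five-branch matching with a phrase->last-position
-- hash index built once, probed at only the five candidate prefixes (objective: alternative).


-- ===== PORT A =====
-- one loop iteration of A: the five length branches in order, updating the
-- (inFPhrases, tl_phrase, w_used) state (phrase.getD i "" = phrase[i], always
-- in range since each branch checks the exact length first)
def stepA (word word2 word3 word4 word5 : String)
    (st : Bool × List String × Int) (phrase : List String) : Bool × List String × Int :=
  let length := phrase.length
  let st := if length = 1 ∧ word = phrase.getD 0 "" then (true, phrase, (1 : Int)) else st
  let st := if length = 2 ∧ word = phrase.getD 0 "" ∧ word2 = phrase.getD 1 "" then (true, phrase, (2 : Int)) else st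
  let st := if length = 3 ∧ word = phrase.getD 0 "" ∧ word2 = phrase.getD 1 "" ∧ word3 = phrase.getD 2 "" then (true, phrase, (3 : Int)) else st
  let st := if length = 4 ∧ word = phrase.getD 0 "" ∧ word2 = phrase.getD 1 "" ∧ word3 = phrase.getD 2 "" ∧ word4 = phrase.getD 3 "" then (true, phrase, (4 : Int)) else st
  let st := if length = 5 ∧ word = phrase.getD 0 "" ∧ word2 = phrase.getD 1 "" ∧ word3 = phrase.getD 2 "" ∧ word4 = phrase.getD 3 "" ∧ word5 = phrase.getD 4 "" then (true, phrase, (5 : Int)) else st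
  st

def inFPhrases (word : String) (word2 : String) (word3 : String) (word4 : String) (word5 : String) (tl_phrases : List (List String)) : Bool × List String × Int :=
  tl_phrases.foldl (stepA word word2 word3 word4 word5) (false, [], 0)

-- ===== PORT B =====
-- last = {}; for i, phrase in enumerate(tl_phrases): last[tuple(phrase)] = i
def buildLast (tl_phrases : List (List String)) : PySem.Dict (List String) Int :=
  (PySem.List.enumerate tl_phrases 0).foldl (fun d p => d.insert p.2 p.1) PySem.Dict.empty

-- best_i, best_k = -1, 0; for k in range(1,6): i = last.get(tuple(words[:k]), -1); if i > best_i: …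
def candBest (last : PySem.Dict (List String) Int) (words : List String) : Int × Int :=
  (PySem.List.pyRange 1 6 1).foldl
    (fun b k =>
      let i := last.getD (PySem.List.slice words none (some k)) (-1)
      if i > b.1 then (i, k) else b)
    (-1, 0)

def inFPhrases_alt (word : String) (word2 : String) (word3 : String) (word4 : String) (word5 : String) (tl_phrases : List (List String)) : Bool × List String × Int :=
  let words := [word, word2, word3, word4, word5]
  let b := candBest (buildLast tl_phrases) words
  if b.1 < 0 then (false, [], 0)
  -- tl_phrases[best_i]: best_i is a stored enumerate index, always in range
  else (true, (PySem.List.pyGet? tl_phrases b.1).getD [], b.2)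

-- ===== PRECONDITION & SPEC =====
def Spec_inFPhrases (word : String) (word2 : String) (word3 : String) (word4 : String) (word5 : String) (tl_phrases : List (List String)) (out : Bool × List String × Int) : Prop := out = inFPhrases_alt word word2 word3 word4 word5 tl_phrases
instance (word : String) (word2 : String) (word3 : String) (word4 : String) (word5 : String) (tl_phrases : List (List String)) (out : Bool × List String × Int) : Decidable (Spec_inFPhrases word word2 word3 word4 word5 tl_phrases out) := by unfold Spec_inFPhrases; infer_instance

-- ===== CLAIM (what is proved, stated in full; the proofs are below) =====
def Claim_equal_inFPhrases : Prop := ∀ (word : String) (word2 : String) (word3 : String) (word4 : String) (word5 : String) (tl_phrases : List (List String)), Dom_inFPhrases word word2 word3 word4 word5 tl_phrases → Spec_inFPhrases word word2 word3 word4 word5 tl_phrases (inFPhrases word word2 word3 word4 word5 tl_phrases)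

-- ===== LEMMAS AND PROOFS =====

-- proof-side reference: a phrase matches the words iff it is one of the five
-- candidate prefixes, i.e. 1 ≤ len ≤ 5 and phrase = words.take len
def isCand (words p : List String) : Bool :=
  decide (1 ≤ p.length) && decide (p.length ≤ 5) && (words.take p.length == p)

-- proof-side reference: first match in the reversed list (= A's last match)
def altFind (words : List String) : List (List String) → Bool × List String × Int
  | [] => (false, [], 0)
  | p :: rest => if isCand words p then (true, p, (p.length : Int)) else altFind words rest

-- A's loop body equals "if the uniform candidate test fires, take (true, phrase, len), else keep the state"
theorem stepA_eq (word word2 word3 word4 word5 : String)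
    (st : Bool × List String × Int) (p : List String) :
    stepA word word2 word3 word4 word5 st p =
      (if isCand [word, word2, word3, word4, word5] p then (true, p, (p.length : Int)) else st) := by
  match p with
  | [] => simp [stepA, isCand]
  | [a] =>
      simp only [stepA, isCand, List.length_cons, List.length_nil, List.take, List.getD]
      by_cases h : word = a <;> simp [h]
  | [a, b] =>
      simp only [stepA, isCand, List.length_cons, List.length_nil, List.take, List.getD]
      by_cases h1 : word = a <;> by_cases h2 : word2 = b <;> simp [h1, h2]
  | [a, b, c] =>
      simp only [stepA, isCand, List.length_cons, List.length_nil, List.take, List.getD]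
      by_cases h1 : word = a <;> by_cases h2 : word2 = b <;> by_cases h3 : word3 = c <;>
        simp [h1, h2, h3]
  | [a, b, c, d] =>
      simp only [stepA, isCand, List.length_cons, List.length_nil, List.take, List.getD]
      by_cases h1 : word = a <;> by_cases h2 : word2 = b <;> by_cases h3 : word3 = c <;>
        by_cases h4 : word4 = d <;> simp [h1, h2, h3, h4]
  | [a, b, c, d, e] =>
      simp only [stepA, isCand, List.length_cons, List.length_nil, List.take, List.getD]
      by_cases h1 : word = a <;> by_cases h2 : word2 = b <;> by_cases h3 : word3 = c <;>
        by_cases h4 : word4 = d <;> by_cases h5 : word5 = e <;> simp [h1, h2, h3, h4, h5]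
  | a :: b :: c :: d :: e :: f :: t =>
      simp [stepA, isCand]

-- forward foldl with last-match-wins state = reversed first-match scan
theorem foldl_eq_altFind (word word2 word3 word4 word5 : String)
    (l : List (List String)) (st : Bool × List String × Int) :
    l.foldl (stepA word word2 word3 word4 word5) st =
      (let r := altFind [word, word2, word3, word4, word5] l.reverse
       if r.1 then r else st) := by
  induction l using List.reverseRecOn generalizing st with
  | nil => simp [altFind]
  | append_singleton l p ih =>
      simp only [List.foldl_append, List.foldl_cons, List.foldl_nil, List.reverse_append,
        List.reverse_cons, List.reverse_nil, List.nil_append, List.cons_append, altFind]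
      rw [stepA_eq]
      by_cases h : isCand [word, word2, word3, word4, word5] p = true
      · simp [h]
      · simp only [Bool.not_eq_true] at h
        simp [h, ih st]

theorem altFind_false (words : List String) (l : List (List String))
    (h : (altFind words l).1 = false) : altFind words l = (false, [], 0) := by
  induction l with
  | nil => simp [altFind]
  | cons q t iht =>
      simp only [altFind] at h ⊢
      by_cases hm : isCand words q = true
      · simp [hm] at h
      · simp only [hm, Bool.false_eq_true, if_false] at h ⊢
        exact iht h

-- A equals the reversed first-match reference
theorem A_eq_altFind (word word2 word3 word4 word5 : String) (tl : List (List String)) :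
    inFPhrases word word2 word3 word4 word5 tl =
      altFind [word, word2, word3, word4, word5] tl.reverse := by
  unfold inFPhrases
  rw [foldl_eq_altFind]
  by_cases hb : (altFind [word, word2, word3, word4, word5] tl.reverse).1 = true
  · simp [hb]
  · simp only [Bool.not_eq_true] at hb
    simp [altFind_false _ _ hb]

-- ===== B-side lemmas =====

theorem buildLast_append (l : List (List String)) (p : List String) :
    buildLast (l ++ [p]) = (buildLast l).insert p (l.length : Int) := by
  simp [buildLast, PySem.List.enumerate_append, List.foldl_append, PySem.List.enumerate]

theorem buildLast_getD_bounds (l : List (List String)) (key : List String) :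
    -1 ≤ (buildLast l).getD key (-1) ∧ (buildLast l).getD key (-1) < (l.length : Int) := by
  induction l using List.reverseRecOn with
  | nil => simp [buildLast, PySem.List.enumerate, PySem.Dict.getD_empty]
  | append_singleton l p ih =>
      rw [buildLast_append, PySem.Dict.getD_insert]
      by_cases h : key = p <;> simp [h] <;> omega

-- generic facts about the "keep the max with its k" fold
def bstep (g : Int → Int) (b : Int × Int) (k : Int) : Int × Int :=
  if g k > b.1 then (g k, k) else b

theorem bfold_stay (g : Int → Int) (ks : List Int) (b : Int × Int)
    (h : ∀ k ∈ ks, g k ≤ b.1) : ks.foldl (bstep g) b = b := by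
  induction ks with
  | nil => rfl
  | cons k t ih =>
      have hk : ¬ g k > b.1 := by have := h k (by simp); omega
      simp only [List.foldl_cons, bstep, hk, if_false]
      exact ih (fun k hk => h k (by simp [hk]))

theorem bfold_lt (g : Int → Int) (ks : List Int) (b : Int × Int) (M : Int)
    (hb : b.1 < M) (h : ∀ k ∈ ks, g k < M) : (ks.foldl (bstep g) b).1 < M := by
  induction ks generalizing b with
  | nil => exact hb
  | cons k t ih =>
      simp only [List.foldl_cons, bstep]
      by_cases hk : g k > b.1
      · simp only [hk, if_true]
        exact ih (g k, k) (h k (by simp)) (fun k hk => h k (by simp [hk]))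
      · simp only [hk, if_false]
        exact ih b hb (fun k hk => h k (by simp [hk]))

theorem bfold_max (g : Int → Int) (l1 l2 : List Int) (k0 N : Int) (b : Int × Int)
    (h1 : ∀ k ∈ l1, g k < N) (h2 : g k0 = N) (h3 : ∀ k ∈ l2, g k < N) (hb : b.1 < N) :
    (l1 ++ k0 :: l2).foldl (bstep g) b = (N, k0) := by
  induction l1 generalizing b with
  | nil =>
      simp only [List.nil_append, List.foldl_cons]
      have : bstep g b k0 = (N, k0) := by simp [bstep, h2]; omega
      rw [this]
      exact bfold_stay g l2 (N, k0) (fun k hk => le_of_lt (h3 k hk))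
  | cons a t ih =>
      simp only [List.cons_append, List.foldl_cons, bstep]
      by_cases hk : g a > b.1
      · simp only [hk, if_true]
        exact ih (g a, a) (fun k hk => h1 k (by simp [hk])) (h1 a (by simp))
      · simp only [hk, if_false]
        exact ih b (fun k hk => h1 k (by simp [hk])) hb

theorem bfold_congr (g g' : Int → Int) (ks : List Int) (b : Int × Int)
    (h : ∀ k ∈ ks, g k = g' k) : ks.foldl (bstep g) b = ks.foldl (bstep g') b := by
  induction ks generalizing b with
  | nil => rfl
  | cons k t ih =>
      simp only [List.foldl_cons, bstep, h k (by simp)]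
      exact ih _ (fun k hk => h k (by simp [hk]))

theorem pyRange16 : PySem.List.pyRange 1 6 1 = [1, 2, 3, 4, 5] := by decide

theorem candBest_eq_bfold (last : PySem.Dict (List String) Int) (words : List String) :
    candBest last words =
      [1, 2, 3, 4, 5].foldl (bstep (fun k => last.getD (PySem.List.slice words none (some k)) (-1))) (-1, 0) := by
  rw [candBest, pyRange16]; rfl

theorem candBest_insert_match (d : PySem.Dict (List String) Int)
    (w1 w2 w3 w4 w5 : String) (p : List String) (N : Int)
    (hm : isCand [w1, w2, w3, w4, w5] p = true)
    (hd : ∀ key, d.getD key (-1) < N) (hN : 0 ≤ N) :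
    candBest (d.insert p N) [w1, w2, w3, w4, w5] = (N, (p.length : Int)) := by
  have hp : 1 ≤ p.length ∧ p.length ≤ 5 ∧ [w1, w2, w3, w4, w5].take p.length = p := by
    simp only [isCand, Bool.and_eq_true, decide_eq_true_eq, beq_iff_eq] at hm
    exact ⟨hm.1.1, hm.1.2, hm.2⟩
  rw [candBest_eq_bfold]
  have gval : ∀ k : Int, 0 < k → k ≤ 5 →
      (d.insert p N).getD (PySem.List.slice [w1, w2, w3, w4, w5] none (some k)) (-1) =
        if k = (p.length : Int) then N
        else d.getD ([w1, w2, w3, w4, w5].take k.toNat) (-1) := by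
    intro k hk0 hk5
    rw [PySem.List.slice_to _ (by omega), PySem.Dict.getD_insert]
    by_cases he : k = (p.length : Int)
    · have : k.toNat = p.length := by omega
      rw [if_pos (by rw [this, hp.2.2]), if_pos he]
    · rw [if_neg, if_neg he]
      intro heq
      have h1 : ([w1, w2, w3, w4, w5].take k.toNat).length = k.toNat := by
        simp; omega
      rw [heq] at h1
      omega
  have hglt : ∀ k : Int, 0 < k → k ≤ 5 → k ≠ (p.length : Int) →
      (d.insert p N).getD (PySem.List.slice [w1, w2, w3, w4, w5] none (some k)) (-1) < N := by
    intro k hk0 hk5 hne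
    rw [gval k hk0 hk5, if_neg hne]
    exact hd _
  have hgeq : ∀ k : Int, 0 < k → k ≤ 5 → k = (p.length : Int) →
      (d.insert p N).getD (PySem.List.slice [w1, w2, w3, w4, w5] none (some k)) (-1) = N := by
    intro k hk0 hk5 he
    rw [gval k hk0 hk5, if_pos he]
  have h15 : p.length = 1 ∨ p.length = 2 ∨ p.length = 3 ∨ p.length = 4 ∨ p.length = 5 := by omega
  rcases h15 with hL | hL | hL | hL | hL <;> rw [hL] <;> rw [hL] at hgeq hglt
  · exact bfold_max _ [] [2, 3, 4, 5] 1 N (-1, 0) (by intro k hk; simp at hk)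
      (hgeq 1 (by omega) (by omega) (by norm_num))
      (by intro k hk; fin_cases hk <;> exact hglt _ (by omega) (by omega) (by norm_num)) (by omega)
  · exact bfold_max _ [1] [3, 4, 5] 2 N (-1, 0)
      (by intro k hk; fin_cases hk <;> exact hglt _ (by omega) (by omega) (by norm_num))
      (hgeq 2 (by omega) (by omega) (by norm_num))
      (by intro k hk; fin_cases hk <;> exact hglt _ (by omega) (by omega) (by norm_num)) (by omega)
  · exact bfold_max _ [1, 2] [4, 5] 3 N (-1, 0)
      (by intro k hk; fin_cases hk <;> exact hglt _ (by omega) (by omega) (by norm_num))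
      (hgeq 3 (by omega) (by omega) (by norm_num))
      (by intro k hk; fin_cases hk <;> exact hglt _ (by omega) (by omega) (by norm_num)) (by omega)
  · exact bfold_max _ [1, 2, 3] [5] 4 N (-1, 0)
      (by intro k hk; fin_cases hk <;> exact hglt _ (by omega) (by omega) (by norm_num))
      (hgeq 4 (by omega) (by omega) (by norm_num))
      (by intro k hk; fin_cases hk <;> exact hglt _ (by omega) (by omega) (by norm_num)) (by omega)
  · exact bfold_max _ [1, 2, 3, 4] [] 5 N (-1, 0)
      (by intro k hk; fin_cases hk <;> exact hglt _ (by omega) (by omega) (by norm_num))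
      (hgeq 5 (by omega) (by omega) (by norm_num))
      (by intro k hk; simp at hk) (by omega)

theorem candBest_insert_nomatch (d : PySem.Dict (List String) Int)
    (w1 w2 w3 w4 w5 : String) (p : List String) (N : Int)
    (hm : isCand [w1, w2, w3, w4, w5] p = false) :
    candBest (d.insert p N) [w1, w2, w3, w4, w5] = candBest d [w1, w2, w3, w4, w5] := by
  rw [candBest_eq_bfold, candBest_eq_bfold]
  apply bfold_congr
  intro k hk
  have hk' : 0 < k ∧ k ≤ 5 := by fin_cases hk <;> norm_num
  rw [PySem.List.slice_to _ (by omega), PySem.Dict.getD_insert, if_neg]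
  intro heq
  have h1 : ([w1, w2, w3, w4, w5].take k.toNat).length = k.toNat := by simp; omega
  rw [heq] at h1
  have : isCand [w1, w2, w3, w4, w5] p = true := by
    simp only [isCand, Bool.and_eq_true, decide_eq_true_eq, beq_iff_eq]
    refine ⟨⟨by omega, by omega⟩, ?_⟩
    rw [h1, heq]
  rw [this] at hm
  exact absurd hm (by simp)

theorem candBest_fst_lt (l : List (List String)) (words : List String) :
    (candBest (buildLast l) words).1 < (l.length : Int) := by
  rw [candBest_eq_bfold]
  exact bfold_lt _ _ _ _ (by omega)
    (fun k _ => (buildLast_getD_bounds l _).2)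

theorem pyGet_append_left (l : List (List String)) (p : List String) (i : Int)
    (h0 : 0 ≤ i) (h1 : i < (l.length : Int)) :
    PySem.List.pyGet? (l ++ [p]) i = PySem.List.pyGet? l i := by
  rw [PySem.List.pyGet?_of_nonneg _ h0, PySem.List.pyGet?_of_nonneg _ h0]
  rw [List.getElem?_append_left (by omega)]

-- B equals the reversed first-match reference
theorem B_eq_altFind (word word2 word3 word4 word5 : String) (tl : List (List String)) :
    inFPhrases_alt word word2 word3 word4 word5 tl =
      altFind [word, word2, word3, word4, word5] tl.reverse := by
  induction tl using List.reverseRecOn with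
  | nil =>
      have hb : buildLast ([] : List (List String)) = PySem.Dict.empty := by
        simp [buildLast, PySem.List.enumerate]
      have hc : candBest PySem.Dict.empty [word, word2, word3, word4, word5] = (-1, 0) := by
        rw [candBest_eq_bfold]
        exact bfold_stay _ _ _ (by intro k _; simp [PySem.Dict.getD_empty])
      simp [inFPhrases_alt, hb, hc, altFind]
  | append_singleton l p ih =>
      rw [show (l ++ [p]).reverse = p :: l.reverse by simp]
      simp only [altFind]
      simp only [inFPhrases_alt] at ih ⊢
      rw [buildLast_append]
      by_cases hm : isCand [word, word2, word3, word4, word5] p = true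
      · rw [candBest_insert_match _ _ _ _ _ _ _ _ hm
          (fun key => (buildLast_getD_bounds l key).2) (by omega), if_pos hm]
        rw [if_neg (by simp)]
        simp
      · have hm' : isCand [word, word2, word3, word4, word5] p = false := by
          simpa using hm
        rw [candBest_insert_nomatch _ _ _ _ _ _ _ _ hm', if_neg hm, ← ih]
        by_cases hlt : (candBest (buildLast l) [word, word2, word3, word4, word5]).1 < 0
        · simp [hlt]
        · have hub := candBest_fst_lt l [word, word2, word3, word4, word5]
          simp only [hlt, if_false]
          rw [pyGet_append_left l p _ (by omega) hub]

-- ===== VERDICT (by name: the statement is the Claim_ definition above) =====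
theorem inFPhrases_spec : Claim_equal_inFPhrases := by
  intro word word2 word3 word4 word5 tl _
  unfold Spec_inFPhrases
  rw [A_eq_altFind, B_eq_altFind]
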